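-- pv_equiv track=rewrite | github.com/Silvanaooo/26t1-comp9021-labs | Lab03 Solutions/ex_4_sol.py | f4_1
-- ===== SOURCE A (Python) =====
-- def f4_1(n: int, base: int) -> dict[int, tuple[int]]:
--     """
--     Creates a dictionary mapping integers from 0 to n to their representation in the specified base.
--
--     Uses iterative division by base to convert decimal numbers to the target base.
--
--     :param n: The upper limit of numbers to convert (inclusive)
--     :param base: The target base (between 2 and 9)
--     :return: A dictionary where keys are integers from 0 to n and values are tuples
--         representing those numbers in the specified base
--     """
--     # Initialize dictionary with special case for 0
--     D = {0: (0,)}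
--
--     # Process each number from 1 to n
--     for m in range(1, n + 1):
--         digits = []  # List to store digits in reverse order
--         p = m  # Working copy of the number
--
--         # Convert decimal to the specified base
--         # Keep dividing by base until the quotient is 0
--         while p > 0:
--             remainder = p % base  # Get remainder (current digit)
--             digits.append(remainder) # Store it
--             p //= base  # Update quotient for next step
--
--         # Reverse digits to get correct order and convert to tuple
--         D[m] = tuple(reversed(digits))
--
--     return D
-- ===== SOURCE B (Python) =====
-- def f4_1(n: int, base: int) -> dict[int, tuple[int]]:
--     """Odometer: increment the little-endian digit list once per step
--     instead of re-converting each number by repeated division (alternative algorithm)."""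
--     D = {0: (0,)}
--     rev = [0]  # little-endian digits of the current number
--     for m in range(1, n + 1):
--         i = 0
--         while i < len(rev) and rev[i] == base - 1:
--             rev[i] = 0
--             i += 1
--         if i == len(rev):
--             rev.append(1)
--         else:
--             rev[i] += 1
--         D[m] = tuple(reversed(rev))
--     return D
-- ===== Notes on version B (the rewrite author's own statement) =====
-- stated objective: alternative
-- what changed: Instead of re-converting every m by repeated division, B keeps one little-endian digit list and odometer-increments it once per step; building the output tuples still dominates, so the measured cost is the same.
-- outside the precondition, e.g. on f4_1(1, -2): A returns {0: (0,), 1: (-1,)}, B returns {0: (0,), 1: (1,)}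
import Mathlib
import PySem

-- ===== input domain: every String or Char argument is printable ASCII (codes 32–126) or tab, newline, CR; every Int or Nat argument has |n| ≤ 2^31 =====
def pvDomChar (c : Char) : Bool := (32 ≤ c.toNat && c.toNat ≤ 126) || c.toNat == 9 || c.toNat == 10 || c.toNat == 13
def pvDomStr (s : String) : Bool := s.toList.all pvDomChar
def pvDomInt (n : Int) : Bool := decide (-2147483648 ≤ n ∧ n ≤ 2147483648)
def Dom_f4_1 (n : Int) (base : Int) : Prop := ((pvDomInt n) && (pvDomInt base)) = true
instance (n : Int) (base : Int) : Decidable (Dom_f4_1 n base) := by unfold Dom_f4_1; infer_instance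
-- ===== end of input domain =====

-- B replaces per-number repeated division by an odometer-style incremental digit update (alternative algorithm, same measured cost).

-- ===== PORT A =====
-- inner `while p > 0: digits.append(p % base); p //= base` (fuel-guarded for totality; fuel p.toNat suffices on Pre_)
def aDigits (fuel : Nat) (p : Int) (base : Int) (digits : List Int) : List Int :=
  match fuel with
  | 0 => digits
  | f + 1 =>
    if 0 < p then
      aDigits f (PySem.Int.floordiv p base) base (digits ++ [PySem.Int.mod p base])
    else digits

def f4_1 (n : Int) (base : Int) : List (Int × List Int) :=
  (PySem.List.pyRange 1 (n + 1) 1).foldl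
    (fun D m => D ++ [(m, (aDigits m.toNat m base []).reverse)])
    [((0 : Int), [(0 : Int)])]

-- ===== PORT B =====
-- the inner while-loop of B: zero the leading run of (base-1)s of the little-endian list, then bump or append 1
def incLE (base : Int) : List Int → List Int
  | [] => [1]
  | d :: ds => if d = base - 1 then 0 :: incLE base ds else (d + 1) :: ds

def f4_1_alt (n : Int) (base : Int) : List (Int × List Int) :=
  ((PySem.List.pyRange 1 (n + 1) 1).foldl
    (fun (st : List Int × List (Int × List Int)) m =>
      let rev := incLE base st.1
      (rev, st.2 ++ [(m, rev.reverse)]))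
    ([0], [((0 : Int), [(0 : Int)])])).2

-- ===== PRECONDITION & SPEC =====
-- Pre_ excludes n ≥ 1 with base ≤ 1: there A raises (base 0), loops forever (base 1) or, for
-- negative bases, returns negative-digit tuples outside the function's stated base-2..9 purpose.
def Pre_f4_1 (n : Int) (base : Int) : Prop := n ≤ 0 ∨ 2 ≤ base
instance (n : Int) (base : Int) : Decidable (Pre_f4_1 n base) := by unfold Pre_f4_1; infer_instance
def pvWitness_f4_1 : Int × Int := (5, 2)

def Spec_f4_1 (n : Int) (base : Int) (out : List (Int × List Int)) : Prop := out = f4_1_alt n base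
instance (n : Int) (base : Int) (out : List (Int × List Int)) : Decidable (Spec_f4_1 n base out) := by unfold Spec_f4_1; infer_instance

-- ===== CLAIM (what is proved, stated in full; the proofs are below) =====
def Claim_equal_f4_1 : Prop := ∀ (n : Int) (base : Int), Dom_f4_1 n base → Pre_f4_1 n base → Spec_f4_1 n base (f4_1 n base)

-- ===== LEMMAS AND PROOFS =====

theorem incLE_nil (base : Int) : incLE base [] = [1] := rfl
theorem incLE_cons (base d : Int) (ds : List Int) :
    incLE base (d :: ds) = if d = base - 1 then 0 :: incLE base ds else (d + 1) :: ds := rfl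

-- A's inner loop computes the little-endian base-b digits (appended to acc), for enough fuel.
theorem aDigits_eq (b : Nat) (hb : 2 ≤ b) :
    ∀ (m fuel : Nat), m ≤ fuel → ∀ (acc : List Int),
      aDigits fuel (m : Int) (b : Int) acc = acc ++ (Nat.digits b m).map Int.ofNat := by
  intro m
  induction m using Nat.strong_induction_on with
  | _ m ih =>
    intro fuel hf acc
    match m, fuel with
    | 0, 0 => simp [aDigits]
    | 0, f + 1 => simp [aDigits]
    | m + 1, fuel =>
      obtain ⟨f, rfl⟩ : ∃ f, fuel = f + 1 := ⟨fuel - 1, by omega⟩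
      have hpos : (0 : Int) < ((m + 1 : Nat) : Int) := by exact_mod_cast Nat.succ_pos m
      have hdivlt : (m + 1) / b < m + 1 := Nat.div_lt_self (Nat.succ_pos m) (by omega)
      rw [aDigits, if_pos hpos, PySem.Int.floordiv_natCast, PySem.Int.mod_natCast,
        ih ((m + 1) / b) hdivlt f (by omega),
        Nat.digits_def' (by omega : 1 < b) (Nat.succ_pos m)]
      simp

-- odometer step: incrementing the little-endian digits of m gives the digits of m+1
theorem incLE_digits (b : Nat) (hb : 2 ≤ b) :
    ∀ (m : Nat), (Nat.digits b (m + 1)).map Int.ofNat = incLE (b : Int) ((Nat.digits b m).map Int.ofNat) := by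
  intro m
  induction m using Nat.strong_induction_on with
  | _ m ih =>
    match m with
    | 0 =>
      rw [Nat.digits_def' (by omega : 1 < b) Nat.one_pos,
        Nat.mod_eq_of_lt (by omega : 1 < b), Nat.div_eq_of_lt (by omega : 1 < b)]
      simp [incLE_nil]
    | m + 1 =>
      have hb1 : 1 < b := by omega
      have hb0 : 0 < b := by omega
      have hmod : (m + 1) % b < b := Nat.mod_lt _ hb0
      have hlt : (m + 1) / b < m + 1 := Nat.div_lt_self (Nat.succ_pos m) hb1
      have h1 : b * ((m + 1) / b) + (m + 1) % b = m + 1 := Nat.div_add_mod (m + 1) b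
      by_cases hc : (m + 1) % b = b - 1
      · -- carry: m + 2 = b * ((m+1)/b + 1)
        have hexp : m + 2 = b * ((m + 1) / b + 1) := by rw [Nat.mul_add, Nat.mul_one]; omega
        have hdiv : (m + 2) / b = (m + 1) / b + 1 := by
          rw [hexp, Nat.mul_div_cancel_left _ hb0]
        have hmod2 : (m + 2) % b = 0 := by rw [hexp, Nat.mul_mod_right]
        rw [Nat.digits_def' hb1 (by omega : 0 < m + 2), hmod2, hdiv,
          Nat.digits_def' hb1 (Nat.succ_pos m)]
        simp only [Nat.succ_eq_add_one, List.map_cons]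
        rw [incLE_cons, if_pos (show (Int.ofNat ((m + 1) % b)) = (b : Int) - 1 by
          rw [hc]; simp only [Int.ofNat_eq_natCast]; omega), ih ((m + 1) / b) hlt]
        simp
      · -- no carry
        have hexp : m + 2 = b * ((m + 1) / b) + ((m + 1) % b + 1) := by omega
        have hdiv : (m + 2) / b = (m + 1) / b := by
          rw [hexp, Nat.mul_add_div hb0, Nat.div_eq_of_lt (by omega : (m + 1) % b + 1 < b), Nat.add_zero]
        have hmod2 : (m + 2) % b = (m + 1) % b + 1 := by
          rw [hexp, Nat.mul_add_mod, Nat.mod_eq_of_lt (by omega : (m + 1) % b + 1 < b)]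
        rw [Nat.digits_def' hb1 (by omega : 0 < m + 2), hmod2, hdiv,
          Nat.digits_def' hb1 (Nat.succ_pos m)]
        simp only [Nat.succ_eq_add_one, List.map_cons]
        rw [incLE_cons, if_neg (show ¬ (Int.ofNat ((m + 1) % b)) = (b : Int) - 1 by
          simp only [Int.ofNat_eq_natCast]; omega)]
        simp only [Int.ofNat_eq_natCast]
        push_cast
        ring_nf

-- the little-endian state B maintains (its start value [0] for m = 0)
def repLE (b : Nat) (k : Nat) : List Int :=
  if k = 0 then [0] else (Nat.digits b k).map Int.ofNat

theorem incLE_repLE (b : Nat) (hb : 2 ≤ b) (k : Nat) :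
    incLE (b : Int) (repLE b k) = (Nat.digits b (k + 1)).map Int.ofNat := by
  match k with
  | 0 =>
    rw [repLE, if_pos rfl, Nat.digits_def' (by omega : 1 < b) Nat.one_pos,
      Nat.mod_eq_of_lt (by omega : 1 < b), Nat.div_eq_of_lt (by omega : 1 < b)]
    rw [incLE_cons, if_neg (by omega : ¬ (0 : Int) = (b : Int) - 1)]
    simp
  | k + 1 =>
    rw [repLE, if_neg (Nat.succ_ne_zero k), ← incLE_digits b hb]

-- joint fold invariant over range(1, k+1): B's digit state is repLE, and the two dictionaries agree
theorem fold_invariant (b : Nat) (hb : 2 ≤ b) (k : Nat) :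
    (PySem.List.pyRange 1 ((k : Int) + 1) 1).foldl
      (fun (st : List Int × List (Int × List Int)) m =>
        let rev := incLE (b : Int) st.1
        (rev, st.2 ++ [(m, rev.reverse)]))
      ([0], [((0 : Int), [(0 : Int)])])
    = (repLE b k,
       (PySem.List.pyRange 1 ((k : Int) + 1) 1).foldl
         (fun D m => D ++ [(m, (aDigits m.toNat m (b : Int) []).reverse)])
         [((0 : Int), [(0 : Int)])]) := by
  induction k with
  | zero =>
    rw [show ((0 : Nat) : Int) + 1 = 1 by omega, PySem.List.pyRange_one_eq_nil le_rfl]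
    simp [repLE]
  | succ k ih =>
    have hsplit : PySem.List.pyRange 1 (((k : Int) + 1) + 1) 1
        = PySem.List.pyRange 1 ((k : Int) + 1) 1 ++ [(k : Int) + 1] :=
      PySem.List.pyRange_one_succ_right (by omega)
    have hfuel : ((k : Int) + 1).toNat = k + 1 := by omega
    have hdig : aDigits ((k : Int) + 1).toNat ((k : Int) + 1) (b : Int) []
        = (Nat.digits b (k + 1)).map Int.ofNat := by
      rw [hfuel]
      have h := aDigits_eq b hb (k + 1) (k + 1) le_rfl []
      simpa using h
    push_cast
    rw [hsplit, List.foldl_append, List.foldl_append, ih]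
    simp only [List.foldl_cons, List.foldl_nil]
    rw [incLE_repLE b hb k]
    refine Prod.ext ?_ ?_
    · simp [repLE]
    · simp only []
      rw [hdig]

-- ===== VERDICT (by name: the statement is the Claim_ definition above) =====
theorem f4_1_spec : Claim_equal_f4_1 := by
  intro n base _ hpre
  unfold Spec_f4_1 f4_1 f4_1_alt
  by_cases hn : n ≤ 0
  · rw [PySem.List.pyRange_one_eq_nil (by omega)]
    rfl
  · rcases hpre with hle | hb
    · omega
    · obtain ⟨k, rfl⟩ : ∃ k : Nat, n = (k : Int) := ⟨n.toNat, by omega⟩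
      obtain ⟨b, rfl⟩ : ∃ b : Nat, base = (b : Int) := ⟨base.toNat, by omega⟩
      rw [fold_invariant b (by exact_mod_cast hb) k]
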